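-- pv_equiv track=rewrite | github.com/KIST-delight-robotics/DrumRobot2 | phil_robot/pipeline/motion_resolver.py | _replace_or_append_move_op_cmd
-- ===== SOURCE A (Python) =====
-- def _replace_or_append_move_op_cmd(op_cmds, move_op_cmd):
--     updated_commands = []
--     replaced = False
--
--     for command in op_cmds:
--         if command.startswith("move:") and not replaced:
--             updated_commands.append(move_op_cmd)
--             replaced = True
--         elif not command.startswith("move:"):
--             updated_commands.append(command)
--
--     if not replaced:
--         updated_commands.append(move_op_cmd)
--
--     return updated_commands
-- ===== SOURCE B (Python) =====
-- def _replace_or_append_move_op_cmd(op_cmds, move_op_cmd):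
--     result = [c for c in op_cmds if not c.startswith("move:")]
--     idx = next((i for i, c in enumerate(op_cmds) if c.startswith("move:")), len(op_cmds))
--     result.insert(idx, move_op_cmd)
--     return result
-- ===== Notes on version B (the rewrite author's own statement) =====
-- stated objective: simpler
-- what changed: Replaces A's stateful loop with a 'replaced' flag by a filter of the non-move commands plus an insert of the new move command at the index of the first move command (append when none).
import Mathlib
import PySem

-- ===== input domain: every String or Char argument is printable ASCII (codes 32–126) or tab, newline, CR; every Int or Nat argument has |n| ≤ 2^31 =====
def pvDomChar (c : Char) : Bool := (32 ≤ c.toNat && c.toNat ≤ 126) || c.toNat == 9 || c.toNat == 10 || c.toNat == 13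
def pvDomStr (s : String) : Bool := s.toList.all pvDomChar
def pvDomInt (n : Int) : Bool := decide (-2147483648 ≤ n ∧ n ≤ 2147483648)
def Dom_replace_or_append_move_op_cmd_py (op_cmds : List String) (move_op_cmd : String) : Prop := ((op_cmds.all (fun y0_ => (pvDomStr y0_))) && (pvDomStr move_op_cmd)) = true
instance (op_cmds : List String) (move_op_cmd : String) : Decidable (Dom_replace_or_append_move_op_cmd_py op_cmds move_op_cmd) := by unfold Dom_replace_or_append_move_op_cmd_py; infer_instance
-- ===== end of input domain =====

-- B replaces A's stateful loop (replaced flag) by filter + first-move index + insert: an alternative decomposition, same cost.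

-- ===== PORT A =====
-- A's for-loop over op_cmds carrying (updated_commands, replaced), then the trailing append.
def replace_or_append_move_op_cmd_py (op_cmds : List String) (move_op_cmd : String) : List String :=
  let st := op_cmds.foldl (fun (st : List String × Bool) command =>
    if PySem.Str.startswith command "move:" && !st.2 then (st.1 ++ [move_op_cmd], true)
    else if !(PySem.Str.startswith command "move:") then (st.1 ++ [command], st.2)
    else st) ([], false)
  if !st.2 then st.1 ++ [move_op_cmd] else st.1

-- ===== PORT B =====
-- Source B's `next((i for i, c in enumerate(op_cmds) if c.startswith("move:")), len(op_cmds))`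
def pvFirstMoveIdx : List String → Nat
  | [] => 0
  | c :: rest => if PySem.Str.startswith c "move:" then 0 else 1 + pvFirstMoveIdx rest

def replace_or_append_move_op_cmd_py_alt (op_cmds : List String) (move_op_cmd : String) : List String :=
  let result := op_cmds.filter (fun c => !(PySem.Str.startswith c "move:"))
  let idx := pvFirstMoveIdx op_cmds
  PySem.List.insert result (idx : Int) move_op_cmd

-- ===== PRECONDITION & SPEC =====
def Spec_replace_or_append_move_op_cmd_py (op_cmds : List String) (move_op_cmd : String) (out : List String) : Prop := out = replace_or_append_move_op_cmd_py_alt op_cmds move_op_cmd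
instance (op_cmds : List String) (move_op_cmd : String) (out : List String) : Decidable (Spec_replace_or_append_move_op_cmd_py op_cmds move_op_cmd out) := by unfold Spec_replace_or_append_move_op_cmd_py; infer_instance

-- ===== CLAIM (what is proved, stated in full; the proofs are below) =====
def Claim_equal_replace_or_append_move_op_cmd_py : Prop := ∀ (op_cmds : List String) (move_op_cmd : String), Dom_replace_or_append_move_op_cmd_py op_cmds move_op_cmd → Spec_replace_or_append_move_op_cmd_py op_cmds move_op_cmd (replace_or_append_move_op_cmd_py op_cmds move_op_cmd)

-- ===== LEMMAS AND PROOFS =====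

-- idx never exceeds the filtered list's length (elements before the first move are all non-move).
theorem pvFirstMoveIdx_le_filter (l : List String) :
    pvFirstMoveIdx l ≤ (l.filter (fun c => !(PySem.Str.startswith c "move:"))).length := by
  induction l with
  | nil => simp [pvFirstMoveIdx]
  | cons c rest ih =>
    by_cases h : PySem.Chars.startswith c.toList ['m','o','v','e',':'] = true
    · simp [pvFirstMoveIdx, PySem.Str.startswith, h]
    · simp at ih
      simp [pvFirstMoveIdx, PySem.Str.startswith, h, List.filter_cons]
      omega

-- After `replaced` is true, A's loop appends exactly the non-move commands.
theorem pvLoopTrue (m : String) (l : List String) (acc : List String) :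
    l.foldl (fun (st : List String × Bool) command =>
      if PySem.Str.startswith command "move:" && !st.2 then (st.1 ++ [m], true)
      else if !(PySem.Str.startswith command "move:") then (st.1 ++ [command], st.2)
      else st) (acc, true)
    = (acc ++ l.filter (fun c => !(PySem.Str.startswith c "move:")), true) := by
  induction l generalizing acc with
  | nil => simp
  | cons c rest ih =>
    by_cases h : PySem.Chars.startswith c.toList ['m','o','v','e',':'] = true
    · simp [List.foldl_cons, PySem.Str.startswith, h, List.filter_cons]
      simpa using ih acc
    · simp [List.foldl_cons, PySem.Str.startswith, h, List.filter_cons]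
      simpa using ih (acc ++ [c])

-- Core invariant: A's whole computation, started unreplaced with accumulator acc,
-- equals acc ++ (filtered list with m spliced at the first-move index, take/drop form).
theorem pvKey (m : String) (l : List String) (acc : List String) :
    (let st := l.foldl (fun (st : List String × Bool) command =>
      if PySem.Str.startswith command "move:" && !st.2 then (st.1 ++ [m], true)
      else if !(PySem.Str.startswith command "move:") then (st.1 ++ [command], st.2)
      else st) (acc, false)
     if !st.2 then st.1 ++ [m] else st.1)
    = acc ++ (l.filter (fun c => !(PySem.Str.startswith c "move:"))).take (pvFirstMoveIdx l)
          ++ m :: (l.filter (fun c => !(PySem.Str.startswith c "move:"))).drop (pvFirstMoveIdx l) := by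
  induction l generalizing acc with
  | nil => simp [pvFirstMoveIdx]
  | cons c rest ih =>
    by_cases h : PySem.Chars.startswith c.toList ['m','o','v','e',':'] = true
    · simp [List.foldl_cons, PySem.Str.startswith, h, pvFirstMoveIdx, List.filter_cons]
      have h2 := pvLoopTrue m rest (acc ++ [m])
      simp at h2
      rw [h2]
      simp
    · have hrec := ih (acc ++ [c])
      simp [PySem.Str.startswith, h, pvFirstMoveIdx, List.filter_cons] at hrec ⊢
      rw [Nat.add_comm 1 (pvFirstMoveIdx rest), List.take_succ_cons, List.drop_succ_cons, hrec]
      simp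

-- ===== VERDICT (by name: the statement is the Claim_ definition above) =====
theorem replace_or_append_move_op_cmd_py_spec : Claim_equal_replace_or_append_move_op_cmd_py := by
  intro op_cmds m _
  unfold Spec_replace_or_append_move_op_cmd_py
  unfold replace_or_append_move_op_cmd_py replace_or_append_move_op_cmd_py_alt
  rw [PySem.List.insert_natCast _ _ _ (pvFirstMoveIdx_le_filter op_cmds)]
  simpa using pvKey m op_cmds []
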